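-- pv_equiv track=rewrite | github.com/David203009/Python-Problems-Solve | 7wonders.py | wonder
-- ===== SOURCE A (Python) =====
-- def wonder(a,b,c):
--     sevens = 0
--     suma = a**2 + b**2 + c**2
--     while (a > 0 and b > 0 and c > 0):
--         sevens += 1
--         a -= 1
--         b -= 1
--         c -= 1
--     suma += 7*sevens
--     return suma
-- ===== SOURCE B (Python) =====
-- def wonder(a, b, c):
--     m = min(a, b, c)
--     return a*a + b*b + c*c + (7 * m if m > 0 else 0)
-- ===== Notes on version B (the rewrite author's own statement) =====
-- stated objective: faster
-- what changed: Replaced the decrement-until-nonpositive while loop counting iterations by the closed form 7*min(a,b,c) when all three are positive (0 otherwise).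
import Mathlib
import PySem

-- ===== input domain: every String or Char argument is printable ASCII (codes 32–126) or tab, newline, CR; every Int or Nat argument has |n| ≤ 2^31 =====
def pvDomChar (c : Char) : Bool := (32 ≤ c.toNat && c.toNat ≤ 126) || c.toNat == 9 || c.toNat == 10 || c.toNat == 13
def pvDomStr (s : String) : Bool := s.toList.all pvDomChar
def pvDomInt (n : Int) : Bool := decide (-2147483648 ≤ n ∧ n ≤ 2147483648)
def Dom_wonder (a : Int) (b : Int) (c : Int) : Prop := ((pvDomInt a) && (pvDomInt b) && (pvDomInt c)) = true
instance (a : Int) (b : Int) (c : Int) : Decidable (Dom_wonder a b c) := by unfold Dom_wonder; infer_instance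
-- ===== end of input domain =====

-- B replaces A's decrement-counting while loop by the closed form 7*min(a,b,c) (0 if any is ≤ 0): O(1) instead of O(min).

-- ===== PORT A =====
-- the while loop: state (a,b,c,sevens); returns final sevens
def wonderLoop (a b c sevens : Int) : Int :=
  if h : a > 0 ∧ b > 0 ∧ c > 0 then
    wonderLoop (a - 1) (b - 1) (c - 1) (sevens + 1)
  else sevens
termination_by a.toNat
decreasing_by
  have := h.1; omega

def wonder (a : Int) (b : Int) (c : Int) : Int :=
  let suma := a ^ 2 + b ^ 2 + c ^ 2
  suma + 7 * wonderLoop a b c 0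

-- ===== PORT B =====
def wonder_alt (a : Int) (b : Int) (c : Int) : Int :=
  let m := min a (min b c)
  a * a + b * b + c * c + (if m > 0 then 7 * m else 0)

-- ===== PRECONDITION & SPEC =====
def Spec_wonder (a : Int) (b : Int) (c : Int) (out : Int) : Prop := out = wonder_alt a b c
instance (a : Int) (b : Int) (c : Int) (out : Int) : Decidable (Spec_wonder a b c out) := by unfold Spec_wonder; infer_instance

-- ===== CLAIM (what is proved, stated in full; the proofs are below) =====
def Claim_equal_wonder : Prop := ∀ (a : Int) (b : Int) (c : Int), Dom_wonder a b c → Spec_wonder a b c (wonder a b c)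

-- ===== LEMMAS AND PROOFS =====
theorem wonderLoop_closed (a b c s : Int) :
    wonderLoop a b c s = s + (if min a (min b c) > 0 then min a (min b c) else 0) := by
  by_cases h : a > 0 ∧ b > 0 ∧ c > 0
  · have hm : min a (min b c) > 0 := by
      rcases h with ⟨ha, hb, hc⟩; simp only [min_def]; split_ifs <;> omega
    rw [wonderLoop, dif_pos h, wonderLoop_closed (a - 1) (b - 1) (c - 1) (s + 1)]
    by_cases h2 : min (a - 1) (min (b - 1) (c - 1)) > 0
    · have : min (a - 1) (min (b - 1) (c - 1)) = min a (min b c) - 1 := by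
        simp [min_def]; split_ifs <;> omega
      rw [if_pos h2, if_pos hm, this]; ring
    · have : min a (min b c) = 1 := by
        rcases h with ⟨ha, hb, hc⟩
        simp only [min_def] at *; split_ifs at * <;> omega
      rw [if_neg h2, if_pos hm, this]; ring
  · have hm : ¬ min a (min b c) > 0 := by
      simp only [not_and_or, not_lt] at h
      simp only [min_def]; split_ifs <;> omega
    rw [wonderLoop, dif_neg h, if_neg hm]; ring
termination_by a.toNat
decreasing_by have := h.1; omega

-- ===== VERDICT (by name: the statement is the Claim_ definition above) =====
theorem wonder_spec : Claim_equal_wonder := by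
  intro a b c _
  unfold Spec_wonder wonder wonder_alt
  rw [wonderLoop_closed]
  by_cases hm : min a (min b c) > 0 <;> simp [hm] <;> ring
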